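-- pv_equiv track=rewrite | github.com/snehagpatel/Morse-Code-Translator-Brap-Edition- | brap.py | translate_to_brap
-- ===== SOURCE A (Python) =====
-- MORSE_CODE_DICT = { 'A':'.-', 'B':'-...',
--                     'C':'-.-.', 'D':'-..', 'E':'.',
--                     'F':'..-.', 'G':'--.', 'H':'....',
--                     'I':'..', 'J':'.---', 'K':'-.-',
--                     'L':'.-..', 'M':'--', 'N':'-.',
--                     'O':'---', 'P':'.--.', 'Q':'--.-',
--                     'R':'.-.', 'S':'...', 'T':'-',
--                     'U':'..-', 'V':'...-', 'W':'.--',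
--                     'X':'-..-', 'Y':'-.--', 'Z':'--..',
--                     '1':'.----', '2':'..---', '3':'...--',
--                     '4':'....-', '5':'.....', '6':'-....',
--                     '7':'--...', '8':'---..', '9':'----.',
--                     '0':'-----', ', ':'--..--', '.':'.-.-.-',
--                     '?':'..--..', '/':'-..-.', '-':'-....-',
--                     '(':'-.--.', ')':'-.--.-', ' ': ''}
--
-- MORSE_TO_BRAP= { '.':'brap', '-':'brapbrap', '/': '/'}
--
-- def translate_to_brap(x):
--     x = x.upper()
--     x = x.replace(' ', '')
--     output = ''
--     for i in x:
--         o = MORSE_CODE_DICT[i]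
--         b =''
--         for dotdash in o:
--             b = b + MORSE_TO_BRAP[dotdash] + ' '
--         output = output + b + '. '
--
--     output = output.replace(' . ', '. ')
--     return output
-- ===== SOURCE B (Python) =====
-- # Literal composed table: each character maps straight to its final brap
-- # segment with spacing built in; a single pass skips spaces and joins the
-- # segments, replacing A's nested loops, string accumulation and ' . ' fixup.
-- BRAP = {
--     'A': 'brap brapbrap. ',
--     'B': 'brapbrap brap brap brap. ',
--     'C': 'brapbrap brap brapbrap brap. ',
--     'D': 'brapbrap brap brap. ',
--     'E': 'brap. ',
--     'F': 'brap brap brapbrap brap. ',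
--     'G': 'brapbrap brapbrap brap. ',
--     'H': 'brap brap brap brap. ',
--     'I': 'brap brap. ',
--     'J': 'brap brapbrap brapbrap brapbrap. ',
--     'K': 'brapbrap brap brapbrap. ',
--     'L': 'brap brapbrap brap brap. ',
--     'M': 'brapbrap brapbrap. ',
--     'N': 'brapbrap brap. ',
--     'O': 'brapbrap brapbrap brapbrap. ',
--     'P': 'brap brapbrap brapbrap brap. ',
--     'Q': 'brapbrap brapbrap brap brapbrap. ',
--     'R': 'brap brapbrap brap. ',
--     'S': 'brap brap brap. ',
--     'T': 'brapbrap. ',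
--     'U': 'brap brap brapbrap. ',
--     'V': 'brap brap brap brapbrap. ',
--     'W': 'brap brapbrap brapbrap. ',
--     'X': 'brapbrap brap brap brapbrap. ',
--     'Y': 'brapbrap brap brapbrap brapbrap. ',
--     'Z': 'brapbrap brapbrap brap brap. ',
--     '1': 'brap brapbrap brapbrap brapbrap brapbrap. ',
--     '2': 'brap brap brapbrap brapbrap brapbrap. ',
--     '3': 'brap brap brap brapbrap brapbrap. ',
--     '4': 'brap brap brap brap brapbrap. ',
--     '5': 'brap brap brap brap brap. ',
--     '6': 'brapbrap brap brap brap brap. ',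
--     '7': 'brapbrap brapbrap brap brap brap. ',
--     '8': 'brapbrap brapbrap brapbrap brap brap. ',
--     '9': 'brapbrap brapbrap brapbrap brapbrap brap. ',
--     '0': 'brapbrap brapbrap brapbrap brapbrap brapbrap. ',
--     '.': 'brap brapbrap brap brapbrap brap brapbrap. ',
--     '?': 'brap brap brapbrap brapbrap brap brap. ',
--     '/': 'brapbrap brap brap brapbrap brap. ',
--     '-': 'brapbrap brap brap brap brap brapbrap. ',
--     '(': 'brapbrap brap brapbrap brapbrap brap. ',
--     ')': 'brapbrap brap brapbrap brapbrap brap brapbrap. ',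
-- }
--
-- def translate_to_brap(x):
--     segs = []
--     for c in x:
--         if c != ' ':
--             segs.append(BRAP[c.upper()])
--     return ''.join(segs)
-- ===== Notes on version B (the rewrite author's own statement) =====
-- stated objective: simpler
-- what changed: B uses one literal composed table mapping each character directly to its final brap segment (spacing built in) and makes a single pass that skips spaces, collects segments in a list and joins them, removing A's inner dot/dash loop, string accumulation, whole-string replace(' ','') and the global ' . ' -> '. ' fixup.
import Mathlib
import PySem

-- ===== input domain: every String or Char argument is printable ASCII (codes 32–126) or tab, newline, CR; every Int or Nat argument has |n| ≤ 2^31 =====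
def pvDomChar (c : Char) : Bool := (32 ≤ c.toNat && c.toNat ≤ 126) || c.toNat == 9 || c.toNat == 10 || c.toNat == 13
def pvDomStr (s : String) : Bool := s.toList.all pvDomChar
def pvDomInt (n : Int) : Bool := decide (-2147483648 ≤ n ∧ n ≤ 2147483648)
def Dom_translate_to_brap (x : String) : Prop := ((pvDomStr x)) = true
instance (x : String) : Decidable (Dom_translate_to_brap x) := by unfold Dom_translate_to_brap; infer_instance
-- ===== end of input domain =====

-- B uses one literal composed char→segment table (spacing built in) and a single
-- pass that skips spaces, collects segments in a list and joins them.

-- ===== PORT A =====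
def pvMorseCode : PySem.Dict String String := PySem.Dict.ofList
  [("A",".-"), ("B","-..."), ("C","-.-."), ("D","-.."), ("E","."),
   ("F","..-."), ("G","--."), ("H","...."), ("I",".."), ("J",".---"),
   ("K","-.-"), ("L",".-.."), ("M","--"), ("N","-."), ("O","---"),
   ("P",".--."), ("Q","--.-"), ("R",".-."), ("S","..."), ("T","-"),
   ("U","..-"), ("V","...-"), ("W",".--"), ("X","-..-"), ("Y","-.--"),
   ("Z","--.."), ("1",".----"), ("2","..---"), ("3","...--"), ("4","....-"),
   ("5","....."), ("6","-...."), ("7","--..."), ("8","---.."), ("9","----."),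
   ("0","-----"), (", ","--..--"), (".",".-.-.-"), ("?","..--.."),
   ("/","-..-."), ("-","-....-"), ("(","-.--."), (")","-.--.-"), (" ","")]

def pvMorseToBrap : PySem.Dict String String := PySem.Dict.ofList
  [(".","brap"), ("-","brapbrap"), ("/","/")]

-- KeyError on a missing key is excluded by Pre_; `.getD ""` is never reached with a missing key inside Pre_.
def translate_to_brap (x : String) : String :=
  let x1 := PySem.Str.upper x
  let x2 := PySem.Str.replace x1 " " ""
  let output := x2.toList.foldl (fun output i =>
    let o := (pvMorseCode.get? (String.mk [i])).getD ""
    let b := o.toList.foldl (fun b dotdash =>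
      b ++ (pvMorseToBrap.get? (String.mk [dotdash])).getD "" ++ " ") ""
    output ++ b ++ ". ") ""
  PySem.Str.replace output " . " ". "

-- ===== PORT B =====
-- B's literal composed table, one segment per character (default "" is unreachable
-- inside Pre_; Python raises KeyError there).
def pvSeg (c : Char) : String :=
  match c with
  | 'A' => "brap brapbrap. "
  | 'B' => "brapbrap brap brap brap. "
  | 'C' => "brapbrap brap brapbrap brap. "
  | 'D' => "brapbrap brap brap. "
  | 'E' => "brap. "
  | 'F' => "brap brap brapbrap brap. "
  | 'G' => "brapbrap brapbrap brap. "
  | 'H' => "brap brap brap brap. "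
  | 'I' => "brap brap. "
  | 'J' => "brap brapbrap brapbrap brapbrap. "
  | 'K' => "brapbrap brap brapbrap. "
  | 'L' => "brap brapbrap brap brap. "
  | 'M' => "brapbrap brapbrap. "
  | 'N' => "brapbrap brap. "
  | 'O' => "brapbrap brapbrap brapbrap. "
  | 'P' => "brap brapbrap brapbrap brap. "
  | 'Q' => "brapbrap brapbrap brap brapbrap. "
  | 'R' => "brap brapbrap brap. "
  | 'S' => "brap brap brap. "
  | 'T' => "brapbrap. "
  | 'U' => "brap brap brapbrap. "
  | 'V' => "brap brap brap brapbrap. "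
  | 'W' => "brap brapbrap brapbrap. "
  | 'X' => "brapbrap brap brap brapbrap. "
  | 'Y' => "brapbrap brap brapbrap brapbrap. "
  | 'Z' => "brapbrap brapbrap brap brap. "
  | '1' => "brap brapbrap brapbrap brapbrap brapbrap. "
  | '2' => "brap brap brapbrap brapbrap brapbrap. "
  | '3' => "brap brap brap brapbrap brapbrap. "
  | '4' => "brap brap brap brap brapbrap. "
  | '5' => "brap brap brap brap brap. "
  | '6' => "brapbrap brap brap brap brap. "
  | '7' => "brapbrap brapbrap brap brap brap. "
  | '8' => "brapbrap brapbrap brapbrap brap brap. "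
  | '9' => "brapbrap brapbrap brapbrap brapbrap brap. "
  | '0' => "brapbrap brapbrap brapbrap brapbrap brapbrap. "
  | '.' => "brap brapbrap brap brapbrap brap brapbrap. "
  | '?' => "brap brap brapbrap brapbrap brap brap. "
  | '/' => "brapbrap brap brap brapbrap brap. "
  | '-' => "brapbrap brap brap brap brap brapbrap. "
  | '(' => "brapbrap brap brapbrap brapbrap brap. "
  | ')' => "brapbrap brap brapbrap brapbrap brap brapbrap. "
  | _ => ""

def translate_to_brap_alt (x : String) : String :=
  let segs := x.toList.foldl (fun (segs : List String) c =>
    if c == ' ' then segs else segs ++ [pvSeg (PySem.Chars.upperChar c)]) []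
  PySem.Str.join "" segs

-- ===== PRECONDITION & SPEC =====
def pvAlphabet : List Char := [' ', '.', '?', '/', '-', '(', ')', '0', '1', '2', '3', '4', '5', '6', '7', '8', '9', 'A', 'B', 'C', 'D', 'E', 'F', 'G', 'H', 'I', 'J', 'K', 'L', 'M', 'N', 'O', 'P', 'Q', 'R', 'S', 'T', 'U', 'V', 'W', 'X', 'Y', 'Z', 'a', 'b', 'c', 'd', 'e', 'f', 'g', 'h', 'i', 'j', 'k', 'l', 'm', 'n', 'o', 'p', 'q', 'r', 's', 't', 'u', 'v', 'w', 'x', 'y', 'z']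

-- Pre_ excludes exactly the inputs on which Python A raises KeyError: strings containing a
-- character with no Morse-code entry.
def Pre_translate_to_brap (x : String) : Prop := (x.toList.all (fun c => pvAlphabet.contains c)) = true
instance (x : String) : Decidable (Pre_translate_to_brap x) := by unfold Pre_translate_to_brap; infer_instance

def pvWitness_translate_to_brap : String := "E5"

def Spec_translate_to_brap (x : String) (out : String) : Prop := out = translate_to_brap_alt x
instance (x : String) (out : String) : Decidable (Spec_translate_to_brap x out) := by unfold Spec_translate_to_brap; infer_instance

-- ===== CLAIM (what is proved, stated in full; the proofs are below) =====
def Claim_equal_translate_to_brap : Prop := ∀ (x : String), Dom_translate_to_brap x → Pre_translate_to_brap x → Spec_translate_to_brap x (translate_to_brap x)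

-- ===== LEMMAS AND PROOFS =====

-- the uppercase, non-space alphabet actually looked up after removing spaces
def pvNS : List Char := ['.', '?', '/', '-', '(', ')', '0', '1', '2', '3', '4', '5', '6', '7', '8', '9', 'A', 'B', 'C', 'D', 'E', 'F', 'G', 'H', 'I', 'J', 'K', 'L', 'M', 'N', 'O', 'P', 'Q', 'R', 'S', 'T', 'U', 'V', 'W', 'X', 'Y', 'Z']

-- per-character Morse string and joined brap words
def pvMo (c : Char) : List Char := ((pvMorseCode.get? (String.mk [c])).getD "").toList
def pvJn (c : Char) : List Char :=
  PySem.Chars.join [' '] ((pvMo c).map (fun d => ((pvMorseToBrap.get? (String.mk [d])).getD "").toList))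

lemma pv_go_nil (old new : List Char) (fuel : Nat) (acc : List Char) :
    PySem.Chars.replace.go old new fuel [] acc = acc.reverse := by
  rw [PySem.Chars.replace.go.eq_def]; cases fuel <;> simp

lemma pv_go_skip (new u : List Char) (d : Char) :
    ∀ (l acc : List Char) (fuel : Nat),
    (u ++ d :: l).length ≤ fuel → '.' ∉ u → d ≠ '.' →
    PySem.Chars.replace.go [' ', '.', ' '] new fuel (u ++ d :: l) acc
      = PySem.Chars.replace.go [' ', '.', ' '] new (fuel - u.length) (d :: l) (u.reverse ++ acc) := by
  induction u with
  | nil => intro l acc fuel _ _ _; simp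
  | cons c u ih =>
    intro l acc fuel hfu hdot hd
    simp only [List.length_cons, List.length_append] at hfu
    obtain ⟨f, rfl⟩ : ∃ f, fuel = f + 1 := ⟨fuel - 1, by omega⟩
    have hpf : ([' ', '.', ' ']).isPrefixOf (c :: (u ++ d :: l)) = false := by
      cases u with
      | nil =>
        simp only [List.nil_append, List.isPrefixOf, Bool.and_eq_false_iff, beq_eq_false_iff_ne]
        right; left; exact fun h => hd h.symm
      | cons e u' =>
        have he : e ≠ '.' := fun h => hdot (by simp [h])
        simp only [List.cons_append, List.isPrefixOf, Bool.and_eq_false_iff, beq_eq_false_iff_ne]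
        right; left; exact fun h => he h.symm
    rw [PySem.Chars.replace.go.eq_def]
    simp only [List.cons_append, hpf, if_neg Bool.false_ne_true]
    have hdot' : '.' ∉ u := fun h => hdot (by simp [h])
    have hfu' : (u ++ d :: l).length ≤ f := by
      simp only [List.length_append, List.length_cons]; omega
    rw [ih l (c :: acc) f hfu' hdot' hd]
    rw [show f + 1 - (c :: u).length = f - u.length from by
          simp only [List.length_cons]; omega,
        show u.reverse ++ (c :: acc) = (c :: u).reverse ++ acc from by simp]

lemma pv_go_sep (new rest acc : List Char) (fuel : Nat) (h : 3 + rest.length ≤ fuel) :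
    PySem.Chars.replace.go [' ', '.', ' '] new fuel ([' ', '.', ' '] ++ rest) acc
      = PySem.Chars.replace.go [' ', '.', ' '] new (fuel - 1) rest (new.reverse ++ acc) := by
  obtain ⟨f, rfl⟩ : ∃ f, fuel = f + 1 := ⟨fuel - 1, by omega⟩
  rw [PySem.Chars.replace.go.eq_def]
  simp [List.isPrefixOf]

lemma pv_go_concat (cs : List (List Char)) :
    ∀ (fuel : Nat) (acc : List Char),
    (cs.flatMap (fun c => c ++ [' ', '.', ' '])).length ≤ fuel →
    (∀ c ∈ cs, '.' ∉ c) →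
    PySem.Chars.replace.go [' ', '.', ' '] ['.', ' '] fuel
        (cs.flatMap (fun c => c ++ [' ', '.', ' '])) acc
      = acc.reverse ++ cs.flatMap (fun c => c ++ ['.', ' ']) := by
  induction cs with
  | nil => intro fuel acc _ _; simp [pv_go_nil]
  | cons c cs ih =>
    intro fuel acc h hc
    have hc0 : '.' ∉ c := hc c (by simp)
    have hcs : ∀ a ∈ cs, '.' ∉ a := fun a ha => hc a (List.mem_cons_of_mem _ ha)
    rw [List.flatMap_cons] at h ⊢
    have hlen : c.length + 3 + (cs.flatMap (fun c => c ++ [' ', '.', ' '])).length ≤ fuel := by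
      simp only [List.length_append, List.length_cons, List.length_nil] at h; omega
    rw [show (c ++ [' ', '.', ' ']) ++ cs.flatMap (fun c => c ++ [' ', '.', ' '])
        = c ++ ' ' :: ('.' :: ' ' :: cs.flatMap (fun c => c ++ [' ', '.', ' '])) from by simp]
    rw [pv_go_skip _ c ' ' ('.' :: ' ' :: cs.flatMap (fun c => c ++ [' ', '.', ' '])) acc fuel
        (by simp only [List.length_append, List.length_cons]; omega) hc0 (by decide)]
    rw [show (' ' :: ('.' :: ' ' :: cs.flatMap (fun c => c ++ [' ', '.', ' '])))
        = [' ', '.', ' '] ++ cs.flatMap (fun c => c ++ [' ', '.', ' ']) from rfl]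
    rw [pv_go_sep _ _ _ _ (by omega)]
    rw [ih (fuel - c.length - 1) _ (by omega) hcs]
    simp

lemma pv_replace_concat (cs : List (List Char)) (hc : ∀ c ∈ cs, '.' ∉ c) :
    PySem.Chars.replace (cs.flatMap (fun c => c ++ [' ', '.', ' '])) [' ', '.', ' '] ['.', ' ']
      = cs.flatMap (fun c => c ++ ['.', ' ']) := by
  unfold PySem.Chars.replace
  simp only [List.isEmpty_cons, if_neg Bool.false_ne_true]
  rw [pv_go_concat _ _ _ le_rfl hc]; simp

lemma pv_go_erase (l : List Char) :
    ∀ (fuel : Nat) (acc : List Char), l.length ≤ fuel →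
    PySem.Chars.replace.go [' '] [] fuel l acc
      = acc.reverse ++ l.filter (fun c => c != ' ') := by
  induction l with
  | nil => intro fuel acc _; simp [pv_go_nil]
  | cons c t ih =>
    intro fuel acc h
    simp only [List.length_cons] at h
    obtain ⟨f, rfl⟩ : ∃ f, fuel = f + 1 := ⟨fuel - 1, by omega⟩
    rw [PySem.Chars.replace.go.eq_def]
    by_cases hc : c = ' '
    · subst hc
      simp only [List.isPrefixOf, BEq.rfl, Bool.and_true, List.isPrefixOf_nil_left, if_pos rfl]
      rw [show ([' '] : List Char).length = 1 from rfl]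
      simp only [List.drop_succ_cons, List.drop_zero, List.reverse_nil, List.nil_append]
      rw [ih f acc (by omega)]; simp
    · have hpf : ([' '] : List Char).isPrefixOf (c :: t) = false := by
        simp only [List.isPrefixOf, List.isPrefixOf_nil_left, Bool.and_true, beq_eq_false_iff_ne]
        exact fun h => hc h.symm
      simp only [hpf, if_neg Bool.false_ne_true]
      rw [ih f (c :: acc) (by omega)]
      simp [hc]

lemma pv_replace_space (s : List Char) :
    PySem.Chars.replace s [' '] [] = s.filter (fun c => c != ' ') := by
  unfold PySem.Chars.replace
  simp only [List.isEmpty_cons, if_neg Bool.false_ne_true]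
  rw [pv_go_erase _ _ _ le_rfl]; simp

-- A's inner word loop, reduced to a list-level flatMap
lemma pv_foldl_words (L : List Char) (s : String) :
    (L.foldl (fun (b : String) d =>
      b ++ (pvMorseToBrap.get? (String.mk [d])).getD "" ++ " ") s).toList
      = s.toList ++ L.flatMap (fun d => ((pvMorseToBrap.get? (String.mk [d])).getD "").toList ++ [' ']) := by
  induction L generalizing s with
  | nil => simp
  | cons c L ih => simp [List.foldl_cons, ih, List.append_assoc]

-- finite per-character facts, each decided once over the whole alphabet
set_option maxRecDepth 8000 in
lemma pvFA0 : (pvNS.all (fun c =>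
    (pvMo c).flatMap (fun d => ((pvMorseToBrap.get? (String.mk [d])).getD "").toList ++ [' '])
      == pvJn c ++ [' '])) = true := by
  decide

lemma pvFA : ∀ c ∈ pvNS,
    (pvMo c).flatMap (fun d => ((pvMorseToBrap.get? (String.mk [d])).getD "").toList ++ [' '])
      = pvJn c ++ [' '] :=
  fun c hc => eq_of_beq ((List.all_eq_true.mp pvFA0) c hc)

set_option maxRecDepth 8000 in
lemma pvFB0 : (pvNS.all (fun c => (pvSeg c).toList == pvJn c ++ ['.', ' '])) = true := by
  decide

lemma pvFB : ∀ c ∈ pvNS, (pvSeg c).toList = pvJn c ++ ['.', ' '] :=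
  fun c hc => eq_of_beq ((List.all_eq_true.mp pvFB0) c hc)

set_option maxRecDepth 8000 in
lemma pvFC0 : (pvNS.all (fun c => !((pvJn c).contains '.'))) = true := by
  decide

lemma pvFC : ∀ c ∈ pvNS, '.' ∉ pvJn c := by
  intro c hc
  have h := (List.all_eq_true.mp pvFC0) c hc
  simpa using h

set_option maxRecDepth 8000 in
lemma pvFD0 : (pvAlphabet.all (fun c =>
    ((c == ' ') && (PySem.Chars.upperChar c == ' '))
      || ((c != ' ') && pvNS.contains (PySem.Chars.upperChar c)))) = true := by
  decide

lemma pvFD : ∀ c ∈ pvAlphabet,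
    (c = ' ' ∧ PySem.Chars.upperChar c = ' ') ∨ (c ≠ ' ' ∧ PySem.Chars.upperChar c ∈ pvNS) := by
  intro c hc
  have h := (List.all_eq_true.mp pvFD0) c hc
  simpa using h

lemma pv_foldl_str (L : List Char) (g : Char → String) (s : String) :
    (L.foldl (fun out i => out ++ g i ++ ". ") s).toList
      = s.toList ++ L.flatMap (fun i => (g i ++ ". ").toList) := by
  induction L generalizing s with
  | nil => simp
  | cons c L ih => simp [List.foldl_cons, ih, List.append_assoc]

lemma pv_join_empty (ps : List (List Char)) : PySem.Chars.join [] ps = ps.flatten := by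
  induction ps with
  | nil => simp [PySem.Chars.join_nil]
  | cons p ps ih =>
    cases ps with
    | nil => simp [PySem.Chars.join, List.intercalate]
    | cons q rest => rw [PySem.Chars.join_cons_cons]; simp_all

-- B's segment-collecting fold, characterised
lemma pv_foldl_segs (l : List Char) (acc : List String) :
    l.foldl (fun (segs : List String) c =>
      if c == ' ' then segs else segs ++ [pvSeg (PySem.Chars.upperChar c)]) acc
    = acc ++ (l.filter (fun c => c != ' ')).map (fun c => pvSeg (PySem.Chars.upperChar c)) := by
  induction l generalizing acc with
  | nil => simp
  | cons c l ih =>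
    rw [List.foldl_cons, ih]
    by_cases hc : c = ' '
    · simp [hc]
    · simp [hc]

-- filter-after-upper commutes for alphabet chars
lemma pv_filter_map (l : List Char) (h : ∀ c ∈ l, c ∈ pvAlphabet) :
    (l.map PySem.Chars.upperChar).filter (fun c => c != ' ')
      = (l.filter (fun c => c != ' ')).map PySem.Chars.upperChar := by
  induction l with
  | nil => simp
  | cons c l ih =>
    have hmem := pvFD c (h c (by simp))
    have ih' := ih (fun a ha => h a (List.mem_cons_of_mem _ ha))
    rcases hmem with ⟨hc, hu⟩ | ⟨hc, _⟩
    · subst hc; simp [hu, ih']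
    · have hu' : PySem.Chars.upperChar c ≠ ' ' := by
        rcases pvFD c (h c (by simp)) with ⟨h1, _⟩ | ⟨_, h2⟩
        · exact absurd h1 hc
        · intro he; rw [he] at h2; revert h2; decide
      simp [hc, hu', ih']

-- ===== VERDICT (by name: the statement is the Claim_ definition above) =====
set_option maxHeartbeats 2000000 in
set_option maxRecDepth 8000 in
theorem translate_to_brap_spec : Claim_equal_translate_to_brap := by
  intro x _ hpre0
  have hpre : ∀ c ∈ x.toList, c ∈ pvAlphabet := by
    intro c hc
    simpa using (List.all_eq_true.mp hpre0) c hc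
  unfold Spec_translate_to_brap translate_to_brap translate_to_brap_alt
  simp only []
  -- the character list A processes after upper + remove spaces
  have hM : (PySem.Str.replace (PySem.Str.upper x) " " "").toList
      = ((x.toList.map PySem.Chars.upperChar).filter (fun c => c != ' ')) := by
    rw [PySem.Str.toList_replace, PySem.Str.toList_upper]
    show PySem.Chars.replace (PySem.Chars.upper x.toList) [' '] [] = _
    rw [pv_replace_space]; rfl
  set M := ((x.toList.map PySem.Chars.upperChar).filter (fun c => c != ' ')) with hMdef
  have hMNS : ∀ c ∈ M, c ∈ pvNS := by
    intro c hm
    rw [hMdef, List.mem_filter] at hm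
    obtain ⟨hmem, hne⟩ := hm
    obtain ⟨a, ha, rfl⟩ := List.mem_map.mp hmem
    rcases pvFD a (hpre a ha) with ⟨_, h⟩ | ⟨_, h⟩
    · exact absurd h (by simpa using hne)
    · exact h
  apply String.ext
  rw [PySem.Str.toList_replace, hM]
  rw [pv_foldl_str M (fun i =>
      (((pvMorseCode.get? (String.mk [i])).getD "").toList).foldl (fun (b : String) d =>
        b ++ (pvMorseToBrap.get? (String.mk [d])).getD "" ++ " ") "")]
  have hpiece : ∀ c ∈ M,
      (((((pvMorseCode.get? (String.mk [c])).getD "").toList).foldl (fun (b : String) d =>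
        b ++ (pvMorseToBrap.get? (String.mk [d])).getD "" ++ " ") "") ++ (". " : String)).toList
      = pvJn c ++ [' ', '.', ' '] := by
    intro c hc
    rw [String.toList_append, pv_foldl_words,
        show (((pvMorseCode.get? (String.mk [c])).getD "").toList) = pvMo c from rfl,
        pvFA c (hMNS c hc),
        show ("" : String).toList = [] from rfl,
        show (". " : String).toList = ['.', ' '] from rfl,
        List.nil_append, List.append_assoc]
    rfl
  have hA : M.flatMap (fun i =>
      (((((pvMorseCode.get? (String.mk [i])).getD "").toList).foldl (fun (b : String) d =>
        b ++ (pvMorseToBrap.get? (String.mk [d])).getD "" ++ " ") "") ++ (". " : String)).toList)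
      = M.flatMap (fun c => pvJn c ++ [' ', '.', ' ']) := by
    unfold List.flatMap
    exact congrArg List.flatten (List.map_congr_left hpiece)
  rw [show ("" : String).toList = [] from rfl, List.nil_append]
  rw [hA]
  rw [show M.flatMap (fun c => pvJn c ++ [' ', '.', ' '])
      = (M.map pvJn).flatMap (fun j => j ++ [' ', '.', ' ']) from by
        rw [List.flatMap_map]]
  rw [show (" . " : String).toList = [' ', '.', ' '] from rfl,
      show (". " : String).toList = ['.', ' '] from rfl]
  rw [pv_replace_concat (M.map pvJn) (by
    intro j hj
    obtain ⟨c, hc, rfl⟩ := List.mem_map.mp hj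
    exact pvFC c (hMNS c hc))]
  -- B's side
  rw [pv_foldl_segs x.toList []]
  rw [PySem.Str.toList_join]
  rw [show ("" : String).toList = [] from rfl, pv_join_empty, List.nil_append, List.map_map]
  rw [show (String.toList ∘ fun c : Char => pvSeg (PySem.Chars.upperChar c))
        = (fun c : Char => (pvSeg c).toList) ∘ PySem.Chars.upperChar from rfl]
  rw [← List.map_map, ← pv_filter_map x.toList hpre, ← hMdef]
  rw [show List.flatMap (fun c => c ++ ['.', ' ']) (M.map pvJn)
        = M.flatMap (fun c => pvJn c ++ ['.', ' ']) from by rw [List.flatMap_map]]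
  show M.flatMap (fun c => pvJn c ++ ['.', ' ']) = (M.map fun c => (pvSeg c).toList).flatten
  unfold List.flatMap
  exact congrArg List.flatten (List.map_congr_left fun c hc => (pvFB c (hMNS c hc)).symm)
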